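-- pv_equiv track=rewrite | github.com/mauxmee/hangman | 24.py | getNewTarget
-- ===== SOURCE A (Python) =====
-- def getNewTarget(n1, n2, r, numbers):
--     temp = []
--     temp.append(r)
--     found1 = -1
--     for i in range(0, len(numbers)):
--         if n1 == numbers[i]:
--             found1 = i
--             break
--
--     found2 = -1
--     for i in range(0, len(numbers)):
--         if n2 == numbers[i]:
--             if found1 == i:
--                 continue
--             found2 = i
--             break
--     for i in range(0, len(numbers)):
--         if(i != found1 and i != found2):
--             temp.append(numbers[i])
--
--     return temp
-- ===== SOURCE B (Python) =====
-- def getNewTarget(n1, n2, r, numbers):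
--     rest = list(numbers)
--     if n1 in rest:
--         rest.remove(n1)
--     if n2 in rest:
--         rest.remove(n2)
--     return [r] + rest
-- ===== Notes on version B (the rewrite author's own statement) =====
-- stated objective: simpler
-- what changed: Replaces the three index-scanning loops and found1/found2 sentinel bookkeeping with two guarded first-occurrence value removals on a copy of the list.
import Mathlib
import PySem

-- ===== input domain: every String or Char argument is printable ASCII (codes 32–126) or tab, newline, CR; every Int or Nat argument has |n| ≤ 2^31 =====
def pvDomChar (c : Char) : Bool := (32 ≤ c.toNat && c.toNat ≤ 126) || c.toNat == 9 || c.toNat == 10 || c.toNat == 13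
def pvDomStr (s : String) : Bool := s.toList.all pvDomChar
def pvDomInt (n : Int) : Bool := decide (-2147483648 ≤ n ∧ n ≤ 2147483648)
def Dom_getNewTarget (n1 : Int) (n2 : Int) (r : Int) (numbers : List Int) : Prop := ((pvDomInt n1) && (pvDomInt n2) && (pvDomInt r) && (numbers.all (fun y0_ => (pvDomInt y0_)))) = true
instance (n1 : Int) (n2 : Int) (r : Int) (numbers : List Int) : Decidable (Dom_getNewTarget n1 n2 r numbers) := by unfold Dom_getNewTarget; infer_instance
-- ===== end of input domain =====

-- B replaces A's three index-scanning loops (found1/found2 sentinels + index filter)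
-- with two guarded first-occurrence value removals on a copy of the list (simpler).


-- ===== PORT A =====
-- first loop: scan for n1 with break; i is the running index
def pvLoop1 (n1 : Int) (xs : List Int) (i : Int) : Int :=
  match xs with
  | [] => -1
  | x :: rest => if n1 == x then i else pvLoop1 n1 rest (i + 1)

-- second loop: scan for n2, 'continue' when the hit index equals found1, break otherwise
def pvLoop2 (n2 : Int) (found1 : Int) (xs : List Int) (i : Int) : Int :=
  match xs with
  | [] => -1
  | x :: rest =>
    if n2 == x then
      (if found1 == i then pvLoop2 n2 found1 rest (i + 1) else i)
    else pvLoop2 n2 found1 rest (i + 1)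

-- third loop: append numbers[i] unless i is found1 or found2
def pvLoop3 (xs : List Int) (found1 found2 : Int) (i : Int) : List Int :=
  match xs with
  | [] => []
  | x :: rest =>
    if i ≠ found1 ∧ i ≠ found2 then x :: pvLoop3 rest found1 found2 (i + 1)
    else pvLoop3 rest found1 found2 (i + 1)

def getNewTarget (n1 : Int) (n2 : Int) (r : Int) (numbers : List Int) : List Int :=
  let found1 := pvLoop1 n1 numbers 0
  let found2 := pvLoop2 n2 found1 numbers 0
  r :: pvLoop3 numbers found1 found2 0

-- ===== PORT B =====
def getNewTarget_alt (n1 : Int) (n2 : Int) (r : Int) (numbers : List Int) : List Int :=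
  let rest := numbers
  let rest := if rest.contains n1 then (PySem.List.remove? rest n1).getD rest else rest
  let rest := if rest.contains n2 then (PySem.List.remove? rest n2).getD rest else rest
  [r] ++ rest

-- ===== PRECONDITION & SPEC =====
def Spec_getNewTarget (n1 : Int) (n2 : Int) (r : Int) (numbers : List Int) (out : List Int) : Prop := out = getNewTarget_alt n1 n2 r numbers
instance (n1 : Int) (n2 : Int) (r : Int) (numbers : List Int) (out : List Int) : Decidable (Spec_getNewTarget n1 n2 r numbers out) := by unfold Spec_getNewTarget; infer_instance

-- ===== CLAIM (what is proved, stated in full; the proofs are below) =====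
def Claim_equal_getNewTarget : Prop := ∀ (n1 : Int) (n2 : Int) (r : Int) (numbers : List Int), Dom_getNewTarget n1 n2 r numbers → Spec_getNewTarget n1 n2 r numbers (getNewTarget n1 n2 r numbers)

-- ===== LEMMAS AND PROOFS =====

-- B's guarded remove is List.erase
theorem alt_erase (xs : List Int) (v : Int) :
    (if xs.contains v then (PySem.List.remove? xs v).getD xs else xs) = xs.erase v := by
  by_cases h : v ∈ xs
  · rw [if_pos (List.contains_iff_mem.mpr h), PySem.List.remove?_eq_some_erase _ _ h]
    rfl
  · rw [if_neg (by simpa using h), List.erase_of_not_mem h]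

theorem alt_eq (n1 n2 r : Int) (numbers : List Int) :
    getNewTarget_alt n1 n2 r numbers = r :: (numbers.erase n1).erase n2 := by
  show [r] ++ (if _ then _ else _) = _
  rw [alt_erase, alt_erase]
  rfl

-- pvLoop1 returns -1 or an index ≥ i
theorem loop1_lb (n : Int) (xs : List Int) (i : Int) :
    pvLoop1 n xs i = -1 ∨ i ≤ pvLoop1 n xs i := by
  induction xs generalizing i with
  | nil => simp [pvLoop1]
  | cons x rest ih =>
    simp only [pvLoop1]
    split
    · omega
    · rcases ih (i + 1) with h | h <;> omega

-- pvLoop2 returns -1 or an index ≥ i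
theorem loop2_lb (n f1 : Int) (xs : List Int) (i : Int) :
    pvLoop2 n f1 xs i = -1 ∨ i ≤ pvLoop2 n f1 xs i := by
  induction xs generalizing i with
  | nil => simp [pvLoop2]
  | cons x rest ih =>
    simp only [pvLoop2]
    split
    · split
      · rcases ih (i + 1) with h | h <;> omega
      · omega
    · rcases ih (i + 1) with h | h <;> omega

-- when found1 lies below the scan range, the 'continue' never fires
theorem loop2_eq_loop1 (n f1 : Int) (xs : List Int) (i : Int) (hf : f1 < i) :
    pvLoop2 n f1 xs i = pvLoop1 n xs i := by
  induction xs generalizing i with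
  | nil => rfl
  | cons x rest ih =>
    simp only [pvLoop2, pvLoop1]
    split
    · rw [if_neg (by simp; omega)]
    · exact ih (i + 1) (by omega)

-- both indices below the range: nothing is dropped
theorem loop3_id (xs : List Int) (f1 f2 i : Int) (h1 : f1 < i) (h2 : f2 < i) :
    pvLoop3 xs f1 f2 i = xs := by
  induction xs generalizing i with
  | nil => rfl
  | cons x rest ih =>
    simp only [pvLoop3]
    rw [if_pos (by constructor <;> omega), ih (i + 1) (by omega) (by omega)]

-- only found1 in range: the loop erases the first occurrence of n
theorem loop3_erase1 (n : Int) (xs : List Int) (f2 i : Int) (hi : 0 ≤ i) (h2 : f2 < i) :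
    pvLoop3 xs (pvLoop1 n xs i) f2 i = xs.erase n := by
  induction xs generalizing i with
  | nil => rfl
  | cons x rest ih =>
    by_cases hx : n = x
    · subst hx
      have e : pvLoop1 n (n :: rest) i = i := by simp [pvLoop1]
      rw [e]
      simp only [pvLoop3]
      rw [if_neg (by omega), loop3_id rest i f2 (i + 1) (by omega) (by omega),
        List.erase_cons_head]
    · have e : pvLoop1 n (x :: rest) i = pvLoop1 n rest (i + 1) := by
        simp [pvLoop1, hx]
      have hlb := loop1_lb n rest (i + 1)
      rw [e]
      simp only [pvLoop3]
      rw [if_pos (by constructor <;> omega), ih (i + 1) (by omega) (by omega),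
        List.erase_cons_tail (by simp; omega)]

-- only found2 in range: same, for the second loop's index
theorem loop3_erase2 (n : Int) (xs : List Int) (f1 i : Int) (hi : 0 ≤ i) (h1 : f1 < i) :
    pvLoop3 xs f1 (pvLoop1 n xs i) i = xs.erase n := by
  induction xs generalizing i with
  | nil => rfl
  | cons x rest ih =>
    by_cases hx : n = x
    · subst hx
      have e : pvLoop1 n (n :: rest) i = i := by simp [pvLoop1]
      rw [e]
      simp only [pvLoop3]
      rw [if_neg (by omega), loop3_id rest f1 i (i + 1) (by omega) (by omega),
        List.erase_cons_head]
    · have e : pvLoop1 n (x :: rest) i = pvLoop1 n rest (i + 1) := by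
        simp [pvLoop1, hx]
      have hlb := loop1_lb n rest (i + 1)
      rw [e]
      simp only [pvLoop3]
      rw [if_pos (by constructor <;> omega), ih (i + 1) (by omega) (by omega),
        List.erase_cons_tail (by simp; omega)]

-- main invariant: A's three loops starting at index i compute two successive erases
theorem main_inv (n1 n2 : Int) (xs : List Int) (i : Int) (hi : 0 ≤ i) :
    pvLoop3 xs (pvLoop1 n1 xs i) (pvLoop2 n2 (pvLoop1 n1 xs i) xs i) i
      = (xs.erase n1).erase n2 := by
  induction xs generalizing i with
  | nil => rfl
  | cons x rest ih =>
    by_cases h1 : n1 = x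
    · -- found1 = i; the head is the one erase n1 removes
      subst h1
      have e1 : pvLoop1 n1 (n1 :: rest) i = i := by simp [pvLoop1]
      have e2 : pvLoop2 n2 i (n1 :: rest) i = pvLoop1 n2 rest (i + 1) := by
        simp only [pvLoop2]
        split
        · rw [if_pos (by simp), loop2_eq_loop1 n2 i rest (i + 1) (by omega)]
        · rw [loop2_eq_loop1 n2 i rest (i + 1) (by omega)]
      rw [e1, e2]
      simp only [pvLoop3]
      rw [if_neg (by omega), loop3_erase2 n2 rest i (i + 1) (by omega) (by omega),
        List.erase_cons_head]
    · have e1 : pvLoop1 n1 (x :: rest) i = pvLoop1 n1 rest (i + 1) := by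
        simp [pvLoop1, h1]
      have hlb1 := loop1_lb n1 rest (i + 1)
      by_cases h2 : n2 = x
      · -- found2 = i; the head is the one erase n2 removes
        have e2 : pvLoop2 n2 (pvLoop1 n1 rest (i + 1)) (x :: rest) i = i := by
          simp only [pvLoop2]
          rw [if_pos (by simp [h2]), if_neg (by simp; omega)]
        subst h2
        rw [e1, e2]
        simp only [pvLoop3]
        rw [if_neg (by omega), loop3_erase1 n1 rest i (i + 1) (by omega) (by omega),
          List.erase_cons_tail (by simp; omega), List.erase_cons_head]
      · -- head kept by both loops and by both erases
        have e2 : pvLoop2 n2 (pvLoop1 n1 rest (i + 1)) (x :: rest) i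
            = pvLoop2 n2 (pvLoop1 n1 rest (i + 1)) rest (i + 1) := by
          simp only [pvLoop2]
          rw [if_neg (by simp [h2])]
        rw [e1, e2]
        have hlb2 := loop2_lb n2 (pvLoop1 n1 rest (i + 1)) rest (i + 1)
        simp only [pvLoop3]
        rw [if_pos (by constructor <;> omega), ih (i + 1) (by omega),
          List.erase_cons_tail (by simp; omega), List.erase_cons_tail (by simp; omega)]

-- ===== VERDICT (by name: the statement is the Claim_ definition above) =====
theorem getNewTarget_spec : Claim_equal_getNewTarget := by
  intro n1 n2 r numbers _
  unfold Spec_getNewTarget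
  rw [alt_eq, getNewTarget, main_inv n1 n2 numbers 0 (by omega)]
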